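-- pv_equiv track=rewrite | github.com/SHIN-MK/Python_PS | PA0_3.py | solution
-- ===== SOURCE A (Python) =====
-- def solution(n, arr1, arr2):
--     answer = []
--     arr = {}
--     arrlist = []
--
--     for i in range(n):
--         arr[i] = bin(arr1[i] | arr2[i]).replace('0b', '')
--         arrlist.append(str(arr.get(i)))
--
--     for i in arrlist:
--         if len(i) == n:
--             answer.append((str(i).replace('1','#')).replace('0', ' '))
--         else:
--             answer.append(((str('0' * (n-len(i)) + i)).replace('1','#')).replace('0', ' '))
--
--     return answer
-- ===== SOURCE B (Python) =====
-- def to_binary(v):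
--     if v < 0:
--         return '-' + to_binary(-v)
--     if v < 2:
--         return str(v)
--     return to_binary(v // 2) + str(v % 2)
--
-- _TABLE = str.maketrans('10', '# ')
--
-- def solution(n, arr1, arr2):
--     return [to_binary(arr1[i] | arr2[i]).translate(_TABLE).rjust(n)
--             for i in range(n)]
-- ===== Notes on version B (the rewrite author's own statement) =====
-- stated objective: alternative
-- what changed: B replaces A's dict plus two-pass bin()/manual-zero-pad/double-replace pipeline with a hand-rolled recursive divmod base-2 converter and a single comprehension using str.translate and rjust.
import Mathlib
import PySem

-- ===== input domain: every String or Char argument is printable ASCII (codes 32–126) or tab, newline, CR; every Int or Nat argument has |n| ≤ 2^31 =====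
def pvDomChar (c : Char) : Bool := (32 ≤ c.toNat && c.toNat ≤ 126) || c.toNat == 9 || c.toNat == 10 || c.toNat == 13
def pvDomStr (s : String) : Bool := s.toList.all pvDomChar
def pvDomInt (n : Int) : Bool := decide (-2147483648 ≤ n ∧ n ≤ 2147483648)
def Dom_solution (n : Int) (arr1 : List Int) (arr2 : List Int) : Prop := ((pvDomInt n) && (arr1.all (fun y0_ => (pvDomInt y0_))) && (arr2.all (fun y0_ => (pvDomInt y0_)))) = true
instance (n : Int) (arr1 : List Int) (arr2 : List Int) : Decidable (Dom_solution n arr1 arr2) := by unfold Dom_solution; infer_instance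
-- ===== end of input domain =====

-- B replaces A's dict + two-pass bin()/zero-pad/double-replace pipeline with a hand-rolled
-- recursive base-2 converter and one comprehension (translate + rjust); objective: alternative.

-- ===== PORT A =====
-- bin(x).replace('0b','') stays as PySem.Int.pyBin followed by PySem.Str.replace, as in the source.
def solution (n : Int) (arr1 : List Int) (arr2 : List Int) : List String :=
  -- first loop: arr (a dict) and arrlist built together; str(arr.get(i)) = the stored string
  -- (str(None) = "None" is the Option default, never reached since i was just inserted)
  let st := (PySem.List.pyRange 0 n 1).foldl
    (fun (st : PySem.Dict Int String × List String) i =>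
      let arr := st.1.insert i (PySem.Str.replace
        (PySem.Int.pyBin (PySem.Int.bor (PySem.List.pyGetD arr1 i 0) (PySem.List.pyGetD arr2 i 0)))
        "0b" "")
      (arr, st.2 ++ [(arr.get? i).getD "None"]))
    (PySem.Dict.empty, [])
  -- second loop: pad to n then replace '1'→'#', '0'→' ' ('0'*(n-len i) is "" for n ≤ len i, like Python)
  st.2.foldl
    (fun answer i =>
      if PySem.Str.len i = n then
        answer ++ [PySem.Str.replace (PySem.Str.replace i "1" "#") "0" " "]
      else
        answer ++ [PySem.Str.replace (PySem.Str.replace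
          (String.ofList (List.replicate (n - PySem.Str.len i).toNat '0') ++ i) "1" "#") "0" " "])
    []

-- ===== PORT B =====
-- to_binary: textbook recursive divmod conversion; '-' prefix for a negative argument — exact
def toBinary (v : Int) : String :=
  if v < 0 then "-" ++ toBinary (-v)
  else if v < 2 then PySem.Int.toStr v
  else toBinary (PySem.Int.floordiv v 2) ++ PySem.Int.toStr (PySem.Int.mod v 2)
termination_by (if v < 0 then 1 else 0) + 2 * v.natAbs
decreasing_by
  · split_ifs <;> omega
  · rw [PySem.Int.floordiv_eq_ediv_of_pos (by omega : (0:Int) < 2)]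
    split_ifs <;> omega

-- s.translate(_TABLE) with _TABLE = str.maketrans('10', '# '): map '1'→'#', '0'→' ', others kept — exact
def pyTranslate (s : String) : String :=
  String.ofList (s.toList.map (fun c => if c = '1' then '#' else if c = '0' then ' ' else c))

-- s.rjust(n): left-pad with spaces up to width n, never truncates — exact
def pyRjust (s : String) (n : Int) : String :=
  String.ofList (List.replicate (n - PySem.Str.len s).toNat ' ') ++ s

def solution_alt (n : Int) (arr1 : List Int) (arr2 : List Int) : List String :=
  (PySem.List.pyRange 0 n 1).map
    (fun i => pyRjust (pyTranslate (toBinary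
      (PySem.Int.bor (PySem.List.pyGetD arr1 i 0) (PySem.List.pyGetD arr2 i 0)))) n)

-- ===== PRECONDITION & SPEC =====
-- Pre_ excludes only n exceeding either list's length, where A raises IndexError.
def Pre_solution (n : Int) (arr1 : List Int) (arr2 : List Int) : Prop :=
  n ≤ (arr1.length : Int) ∧ n ≤ (arr2.length : Int)
instance (n : Int) (arr1 : List Int) (arr2 : List Int) : Decidable (Pre_solution n arr1 arr2) := by unfold Pre_solution; infer_instance
def pvWitness_solution : Int × List Int × List Int := (3, [1, 2, 9], [4, 2, 0])

def Spec_solution (n : Int) (arr1 : List Int) (arr2 : List Int) (out : List String) : Prop := out = solution_alt n arr1 arr2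
instance (n : Int) (arr1 : List Int) (arr2 : List Int) (out : List String) : Decidable (Spec_solution n arr1 arr2 out) := by unfold Spec_solution; infer_instance

-- ===== CLAIM (what is proved, stated in full; the proofs are below) =====
def Claim_equal_solution : Prop := ∀ (n : Int) (arr1 : List Int) (arr2 : List Int), Dom_solution n arr1 arr2 → Pre_solution n arr1 arr2 → Spec_solution n arr1 arr2 (solution n arr1 arr2)

-- ===== LEMMAS AND PROOFS =====

-- MSB-first binary digits of a positive number; [] for 0
def rawbits : Nat → List Char
  | 0 => []
  | m + 1 => rawbits ((m + 1) / 2) ++ [if (m + 1) % 2 = 1 then '1' else '0']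
decreasing_by exact Nat.div_lt_self (Nat.succ_pos m) (by omega)

-- the digit list of bin(m) for m ≥ 0 (Python: bin(0) = '0b0')
def digitsOf (m : Nat) : List Char := if m = 0 then ['0'] else rawbits m

theorem rawbits_pos (m : Nat) (h : 0 < m) :
    rawbits m = rawbits (m / 2) ++ [if m % 2 = 1 then '1' else '0'] := by
  obtain ⟨k, rfl⟩ := Nat.exists_eq_add_of_lt h
  simp [rawbits]

theorem digitsOf_pos (m : Nat) (h2 : 2 ≤ m) :
    digitsOf m = digitsOf (m / 2) ++ [if m % 2 = 1 then '1' else '0'] := by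
  have h1 : m / 2 ≠ 0 := by omega
  rw [digitsOf, digitsOf, if_neg (by omega), if_neg h1, rawbits_pos m (by omega)]

theorem toDigitsCore_eq (fuel : Nat) : ∀ (m : Nat) (acc : List Char), 0 < fuel → m < 2 ^ fuel →
    Nat.toDigitsCore 2 fuel m acc = digitsOf m ++ acc := by
  induction fuel with
  | zero => intro m acc h; omega
  | succ f ih =>
    intro m acc _ hm
    rw [Nat.toDigitsCore]
    by_cases h0 : m / 2 = 0
    · have hm01 : m = 0 ∨ m = 1 := by omega
      rw [if_pos h0]
      rcases hm01 with rfl | rfl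
      · simp [digitsOf, Nat.digitChar]
      · rw [show digitsOf 1 = ['1'] by rw [digitsOf, if_neg (by omega), rawbits_pos 1 (by omega)]; simp [rawbits]]
        simp [Nat.digitChar]
    · rw [if_neg h0]
      have h2 : 2 ≤ m := by omega
      have hmf : m < 2 ^ f * 2 := by rw [← pow_succ]; exact hm
      have hf : 0 < f := by
        rcases Nat.eq_zero_or_pos f with rfl | hf
        · simp at hmf; omega
        · exact hf
      rw [ih (m / 2) _ hf (by omega)]
      rw [digitsOf_pos m h2, List.append_assoc, List.singleton_append]
      congr 2
      have := Nat.mod_two_eq_zero_or_one m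
      rcases this with h | h <;> simp [h, Nat.digitChar]

theorem toDigits_two_eq (m : Nat) : Nat.toDigits 2 m = digitsOf m := by
  rw [Nat.toDigits, toDigitsCore_eq (m + 1) m [] (by omega)
    (lt_of_lt_of_le Nat.lt_two_pow_self (by
      apply Nat.pow_le_pow_right <;> omega)), List.append_nil]

theorem rawbits_mem (m : Nat) : ∀ c ∈ rawbits m, c = '0' ∨ c = '1' := by
  induction m using Nat.strong_induction_on with
  | _ m ih =>
    intro c hc
    match m with
    | 0 => simp [rawbits] at hc
    | m + 1 =>
      rw [rawbits_pos (m + 1) (by omega)] at hc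
      rcases List.mem_append.mp hc with h | h
      · exact ih _ (Nat.div_lt_self (by omega) (by omega)) c h
      · simp at h; split at h <;> simp [h]

theorem digitsOf_mem (m : Nat) : ∀ c ∈ digitsOf m, c = '0' ∨ c = '1' := by
  intro c hc
  rw [digitsOf] at hc
  split at hc
  · simp at hc; simp [hc]
  · exact rawbits_mem m c hc

theorem not_b_digits (m : Nat) : 'b' ∉ digitsOf m := by
  intro h
  rcases digitsOf_mem m 'b' h with h' | h' <;> simp at h'

theorem replace_go_no_b (fuel : Nat) : ∀ (l acc : List Char), 'b' ∉ l →
    PySem.Chars.replace.go ['0', 'b'] [] fuel l acc = acc.reverse ++ l := by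
  induction fuel with
  | zero => intro l acc _; rw [PySem.Chars.replace.go]
  | succ f ih =>
    intro l acc hb
    match l with
    | [] => simp [PySem.Chars.replace.go]
    | a :: t =>
      rw [PySem.Chars.replace.go]
      have hpre : ['0', 'b'].isPrefixOf (a :: t) = false := by
        match t with
        | [] => simp [List.isPrefixOf]
        | x :: t' =>
          have : x ≠ 'b' := fun h => hb (by simp [h])
          simp only [List.isPrefixOf, Bool.and_eq_false_iff]
          by_cases h0 : ('0' : Char) == a
          · right; simp; exact fun h => this h.symm
          · left; simpa using h0
      rw [hpre]
      simp only [Bool.false_eq_true, if_false]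
      rw [ih t (a :: acc) (fun h => hb (by simp [h]))]
      simp

theorem strip_core (fuel : Nat) (ds acc : List Char) (h : 'b' ∉ ds) (hf : 0 < fuel) :
    PySem.Chars.replace.go ['0', 'b'] [] fuel ('0' :: 'b' :: ds) acc = acc.reverse ++ ds := by
  obtain ⟨f, rfl⟩ : ∃ f, fuel = f + 1 := ⟨fuel - 1, by omega⟩
  rw [PySem.Chars.replace.go]
  have hp : ['0', 'b'].isPrefixOf ('0' :: 'b' :: ds) = true := by simp [List.isPrefixOf]
  rw [hp]
  simp only [if_true]
  rw [show List.drop ['0', 'b'].length ('0' :: 'b' :: ds) = ds from rfl]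
  rw [replace_go_no_b f ds _ h]
  simp

theorem replace_go_single (c d : Char) (fuel : Nat) : ∀ (l acc : List Char),
    PySem.Chars.replace.go [c] [d] fuel l acc
      = acc.reverse ++ (l.take fuel).map (fun a => if a = c then d else a) ++ l.drop fuel := by
  induction fuel with
  | zero => intro l acc; rw [PySem.Chars.replace.go]; simp
  | succ f ih =>
    intro l acc
    match l with
    | [] => simp [PySem.Chars.replace.go]
    | a :: t =>
      rw [PySem.Chars.replace.go]
      by_cases hac : a = c
      · have : [c].isPrefixOf (a :: t) = true := by simp [List.isPrefixOf, hac]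
        rw [this]
        simp only [if_true]
        rw [show List.drop [c].length (a :: t) = t from rfl, ih t]
        simp [hac]
      · have : [c].isPrefixOf (a :: t) = false := by simp [List.isPrefixOf]; exact fun h => hac (by simp [h])
        rw [this]
        simp only [Bool.false_eq_true, if_false]
        rw [ih t (a :: acc)]
        simp [hac]

theorem replace_single (c d : Char) (s : List Char) :
    PySem.Chars.replace s [c] [d] = s.map (fun a => if a = c then d else a) := by
  rw [PySem.Chars.replace]
  simp only [List.isEmpty_cons, if_false, Bool.false_eq_true]
  rw [replace_go_single c d s.length s []]
  simp

-- first loop of A: the dict lookup right after the insert returns the inserted string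
theorem fold1_snd (f : Int → String) (l : List Int) :
    ∀ (d : PySem.Dict Int String) (acc : List String),
    (l.foldl (fun st i =>
        let a := st.1.insert i (f i)
        (a, st.2 ++ [(a.get? i).getD "None"])) (d, acc)).2 = acc ++ l.map f := by
  induction l with
  | nil => intro d acc; simp
  | cons x t ih =>
    intro d acc
    simp only [List.foldl_cons, List.map_cons]
    rw [ih]
    simp [PySem.Dict.get?_insert_self]

-- second loop of A: append inside both branches of the if
theorem fold2_ite {α β : Type} (p : α → Prop) [DecidablePred p] (f g : α → β) (l : List α) :
    ∀ acc : List β,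
    (l.foldl (fun acc x => if p x then acc ++ [f x] else acc ++ [g x]) acc)
      = acc ++ l.map (fun x => if p x then f x else g x) := by
  induction l with
  | nil => intro acc; simp
  | cons x t ih =>
    intro acc
    simp only [List.foldl_cons, List.map_cons]
    rw [ih]
    by_cases h : p x <;> simp [h]

-- bin(v).replace('0b','') as a char list: optional '-' then the digits of |v|
theorem sbin_toList (v : Int) :
    (PySem.Str.replace (PySem.Int.pyBin v) "0b" "").toList
      = if v < 0 then '-' :: digitsOf v.natAbs else digitsOf v.natAbs := by
  rw [PySem.Str.toList_replace, PySem.Int.toList_pyBin]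
  rw [show ("0b" : String).toList = ['0', 'b'] from rfl, show ("" : String).toList = [] from rfl]
  rw [PySem.Int.toBinChars0b]
  split
  · rename_i hv
    rw [toDigits_two_eq, PySem.Chars.replace]
    simp only [List.isEmpty_cons, Bool.false_eq_true, if_false]
    rw [show ('-' :: '0' :: 'b' :: digitsOf v.natAbs).length = (digitsOf v.natAbs).length + 3 by simp]
    rw [PySem.Chars.replace.go]
    have hp : ['0', 'b'].isPrefixOf ('-' :: '0' :: 'b' :: digitsOf v.natAbs) = false := by
      simp [List.isPrefixOf]
    rw [hp]
    simp only [Bool.false_eq_true, if_false]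
    rw [strip_core ((digitsOf v.natAbs).length + 2) _ ['-'] (not_b_digits _) (by omega)]
    rfl
  · rename_i hv
    rw [show v.toNat = v.natAbs by omega, toDigits_two_eq, PySem.Chars.replace]
    simp only [List.isEmpty_cons, Bool.false_eq_true, if_false]
    rw [show ('0' :: 'b' :: digitsOf v.natAbs).length = (digitsOf v.natAbs).length + 2 by simp]
    rw [strip_core ((digitsOf v.natAbs).length + 2) _ [] (not_b_digits _) (by omega)]
    rfl

-- B's recursive converter computes the digit list of bin(m) for m ≥ 0
theorem toBinary_nat (m : Nat) : (toBinary (m : Int)).toList = digitsOf m := by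
  induction m using Nat.strong_induction_on with
  | _ m ih =>
    rw [toBinary, if_neg (by omega : ¬ ((m : Int) < 0))]
    by_cases h2 : (m : Int) < 2
    · rw [if_pos h2]
      have hm : m = 0 ∨ m = 1 := by omega
      rcases hm with rfl | rfl
      · rw [show digitsOf 0 = ['0'] by simp [digitsOf]]; decide
      · rw [show digitsOf 1 = ['1'] by
            rw [digitsOf, if_neg (by omega), rawbits_pos 1 (by omega)]; simp [rawbits]]
        decide
    · rw [if_neg h2]
      have hfd : PySem.Int.floordiv (m : Int) 2 = ((m / 2 : Nat) : Int) := by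
        exact_mod_cast PySem.Int.floordiv_natCast m 2
      have hmd : PySem.Int.mod (m : Int) 2 = ((m % 2 : Nat) : Int) := by
        exact_mod_cast PySem.Int.mod_natCast m 2
      rw [hfd, hmd, String.toList_append, ih (m / 2) (Nat.div_lt_self (by omega) (by omega))]
      rw [digitsOf_pos m (by omega)]
      congr 1
      rcases Nat.mod_two_eq_zero_or_one m with h | h <;> rw [h] <;> decide

theorem toBinary_toList (v : Int) :
    (toBinary v).toList = if v < 0 then '-' :: digitsOf v.natAbs else digitsOf v.natAbs := by
  by_cases hv : v < 0
  · rw [toBinary, if_pos hv, if_pos hv, show -v = (v.natAbs : Int) by omega]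
    rw [String.toList_append, toBinary_nat]
    rfl
  · rw [if_neg hv, ← toBinary_nat v.natAbs, show ((v.natAbs : Nat) : Int) = v by omega]

-- the translate table sends '0' to ' ', '1' to '#', keeps everything else
theorem trans_digits (m : Nat) :
    (digitsOf m).map (fun c => if c = '1' then '#' else if c = '0' then ' ' else c)
      = (digitsOf m).map (fun c => if c = '1' then '#' else ' ') := by
  apply List.map_congr_left
  intro c hc
  rcases digitsOf_mem m c hc with rfl | rfl <;> simp

-- A's recolouring sends '0' to ' ', '1' to '#', and keeps '-'
theorem recolour_digits (m : Nat) :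
    (digitsOf m).map ((fun a => if a = '0' then ' ' else a) ∘ fun a => if a = '1' then '#' else a)
      = (digitsOf m).map (fun c => if c = '1' then '#' else ' ') := by
  apply List.map_congr_left
  intro c hc
  rcases digitsOf_mem m c hc with rfl | rfl <;> simp

-- B's row as a char list: spaces, optional '-', recoloured digits
theorem rowB_toList (n v : Int) :
    (pyRjust (pyTranslate (toBinary v)) n).toList
      = List.replicate (n - ((if v < 0 then '-' :: digitsOf v.natAbs else digitsOf v.natAbs).length : Int)).toNat ' '
          ++ (if v < 0 then '-' :: (digitsOf v.natAbs).map (fun c => if c = '1' then '#' else ' ')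
              else (digitsOf v.natAbs).map (fun c => if c = '1' then '#' else ' ')) := by
  rw [pyRjust, pyTranslate, String.toList_append, String.toList_ofList, String.toList_ofList]
  rw [toBinary_toList]
  by_cases hv : v < 0 <;>
    simp only [hv, if_true, if_false, List.map_cons, trans_digits,
      PySem.Str.len_eq, String.toList_ofList, List.length_map, List.length_cons]
  all_goals simp

-- one row: A's pad-and-replace pipeline = B's translate + rjust of to_binary
theorem rowEq (n v : Int) :
    (if PySem.Str.len (PySem.Str.replace (PySem.Int.pyBin v) "0b" "") = n then
       PySem.Str.replace (PySem.Str.replace (PySem.Str.replace (PySem.Int.pyBin v) "0b" "") "1" "#") "0" " "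
     else
       PySem.Str.replace (PySem.Str.replace
         (String.ofList (List.replicate ((n - PySem.Str.len (PySem.Str.replace (PySem.Int.pyBin v) "0b" "")).toNat) '0')
           ++ PySem.Str.replace (PySem.Int.pyBin v) "0b" "") "1" "#") "0" " ")
    = pyRjust (pyTranslate (toBinary v)) n := by
  apply String.toList_inj.mp
  have h1 : ("1" : String).toList = ['1'] := rfl
  have h0 : ("0" : String).toList = ['0'] := rfl
  have hh : ("#" : String).toList = ['#'] := rfl
  have hsp : (" " : String).toList = [' '] := rfl
  have hlenA : PySem.Str.len (PySem.Str.replace (PySem.Int.pyBin v) "0b" "")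
      = ((if v < 0 then '-' :: digitsOf v.natAbs else digitsOf v.natAbs).length : Int) := by
    rw [PySem.Str.len_eq, sbin_toList]
  have hcore : ∀ k : Nat,
      (PySem.Str.replace (PySem.Str.replace
        (String.ofList (List.replicate k '0') ++ PySem.Str.replace (PySem.Int.pyBin v) "0b" "") "1" "#") "0" " ").toList
      = List.replicate k ' '
          ++ (if v < 0 then '-' :: (digitsOf v.natAbs).map (fun c => if c = '1' then '#' else ' ')
              else (digitsOf v.natAbs).map (fun c => if c = '1' then '#' else ' ')) := by
    intro k
    rw [PySem.Str.toList_replace, PySem.Str.toList_replace, h1, h0, hh, hsp]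
    rw [String.toList_append, String.toList_ofList, sbin_toList]
    rw [replace_single, replace_single, List.map_map, List.map_append, List.map_replicate]
    rw [show ((fun a => if a = '0' then ' ' else a) ∘ fun a => if a = '1' then '#' else a) '0' = ' ' by simp]
    congr 1
    split <;> rename_i hv
    · simp only [List.map_cons]
      rw [show ((fun a => if a = '0' then ' ' else a) ∘ fun a => if a = '1' then '#' else a) '-' = '-' by simp]
      rw [recolour_digits v.natAbs]
    · exact recolour_digits v.natAbs
  rw [rowB_toList]
  split
  · rename_i hif
    rw [hlenA] at hif
    rw [show (n - ((if v < 0 then '-' :: digitsOf v.natAbs else digitsOf v.natAbs).length : Int)).toNat = 0 by omega]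
    have hc0 := hcore 0
    rw [show String.ofList (List.replicate 0 '0') = "" from rfl, String.empty_append] at hc0
    simp only [List.replicate_zero, List.nil_append] at hc0 ⊢
    exact hc0
  · rw [hlenA, hcore]

-- ===== VERDICT (by name: the statement is the Claim_ definition above) =====
set_option maxHeartbeats 1600000 in
theorem solution_spec : Claim_equal_solution := by
  intro n arr1 arr2 _ _
  unfold Spec_solution
  simp only [solution, solution_alt]
  rw [fold1_snd]
  rw [fold2_ite (fun i => PySem.Str.len i = n)]
  simp only [List.nil_append, List.map_map]
  apply List.map_congr_left
  intro i _
  simp only [Function.comp_apply]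
  exact rowEq n (PySem.Int.bor (PySem.List.pyGetD arr1 i 0) (PySem.List.pyGetD arr2 i 0))
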